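-- pv_equiv track=rewrite | github.com/isabelle-prover/mirror-afp-devel | admin/sitegen.py | collect_years
-- ===== SOURCE A (Python) =====
-- from collections import OrderedDict
-- from operator import itemgetter
--
-- def collect_years(entries):
-- 	extracted = [
-- 		(attributes['date'] if attributes['date'] != '' else 'unknown', entry, attributes)
-- 		for entry, attributes in entries
-- 	]
-- 	extracted.sort(key = itemgetter(0), reverse = True)
-- 	years = OrderedDict()
-- 	for date, entry, attributes in extracted:
-- 		key = date[0:4] if date != 'unknown' else date
-- 		if key in years:
-- 			years[key].append((entry, attributes))
-- 		else:
-- 			years[key] = [(entry, attributes)]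
-- 	return years.items()
-- ===== SOURCE B (Python) =====
-- from collections import OrderedDict
-- from operator import itemgetter
--
-- def collect_years(entries):
--     buckets = {}
--     for entry, attributes in entries:
--         date = attributes['date'] or 'unknown'
--         key = date if date == 'unknown' else date[0:4]
--         buckets.setdefault(key, []).append((date, entry, attributes))
--     result = OrderedDict()
--     for key in sorted(buckets, reverse=True):
--         group = sorted(buckets[key], key=itemgetter(0), reverse=True)
--         result[key] = [(entry, attributes) for _, entry, attributes in group]
--     return result.items()
-- ===== Notes on version B (the rewrite author's own statement) =====
-- stated objective: alternative
-- what changed: A sorts all entries globally by full date and then groups by first occurrence of the year key; B groups first into per-year buckets in one pass, sorts the keys descending, and sorts each bucket by date descending.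
import Mathlib
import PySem

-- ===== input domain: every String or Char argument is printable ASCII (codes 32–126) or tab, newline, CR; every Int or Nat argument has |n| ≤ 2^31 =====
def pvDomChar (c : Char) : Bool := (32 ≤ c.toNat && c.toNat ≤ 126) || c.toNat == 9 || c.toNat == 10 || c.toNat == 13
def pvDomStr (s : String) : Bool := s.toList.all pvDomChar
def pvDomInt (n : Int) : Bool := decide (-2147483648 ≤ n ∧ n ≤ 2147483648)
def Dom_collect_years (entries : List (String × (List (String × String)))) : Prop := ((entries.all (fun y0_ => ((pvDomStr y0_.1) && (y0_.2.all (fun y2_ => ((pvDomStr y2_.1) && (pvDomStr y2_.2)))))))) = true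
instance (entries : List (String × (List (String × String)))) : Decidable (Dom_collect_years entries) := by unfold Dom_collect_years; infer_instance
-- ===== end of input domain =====

-- B replaces A's global sort + first-occurrence grouping by: bucket per year key in one pass,
-- sort the keys descending, sort each bucket by date descending (alternative decomposition, same cost).

-- ===== PORT A =====
def collect_years (entries : List (String × (List (String × String)))) : List (String × (List (String × (List (String × String))))) :=
  let extracted : List (String × String × List (String × String)) :=
    entries.map (fun p =>
      let d := PySem.Dict.getD (⟨p.2⟩ : PySem.Dict String String) "date" ""
      (if d ≠ "" then d else "unknown", p.1, p.2))
  let extracted := PySem.List.sorted extracted (fun t => t.1) true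
  let years := extracted.foldl
    (fun (y : PySem.Dict String (List (String × List (String × String)))) t =>
      let key := if t.1 ≠ "unknown" then PySem.Str.slice t.1 none (some 4) else t.1
      if y.contains key then y.insert key (y.getD key [] ++ [t.2]) else y.insert key [t.2])
    PySem.Dict.empty
  years.items

-- ===== PORT B =====
def collect_years_alt (entries : List (String × (List (String × String)))) : List (String × (List (String × (List (String × String))))) :=
  let buckets := entries.foldl
    (fun (b : PySem.Dict String (List (String × String × List (String × String)))) p =>
      let d := PySem.Dict.getD (⟨p.2⟩ : PySem.Dict String String) "date" ""
      let date := if d = "" then "unknown" else d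
      let key := if date = "unknown" then date else PySem.Str.slice date none (some 4)
      b.modify key [] (fun v => v ++ [(date, p.1, p.2)]))
    PySem.Dict.empty
  let result := (PySem.List.sorted buckets.keys (fun x => x) true).foldl
    (fun (r : PySem.Dict String (List (String × (List (String × String))))) key =>
      r.insert key ((PySem.List.sorted (buckets.getD key []) (fun t => t.1) true).map (fun t => t.2)))
    PySem.Dict.empty
  result.items

-- ===== PRECONDITION & SPEC =====
-- Pre_ excludes (a) entries whose attributes lack a 'date' key, on which A raises KeyError, and
-- (b) entries with a date that starts with "unkn" without being "unknown", on which A's year-key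
-- order is an accident of sorting full date strings while folding the literal date 'unknown'
-- into the bucket of the empty dates.
def Pre_collect_years (entries : List (String × (List (String × String)))) : Prop :=
  ∀ p ∈ entries,
    (PySem.Dict.contains (⟨p.2⟩ : PySem.Dict String String) "date" = true) ∧
    ¬(((PySem.Dict.getD (⟨p.2⟩ : PySem.Dict String String) "date" "").toList.take 4
        = ['u','n','k','n']) ∧
      (PySem.Dict.getD (⟨p.2⟩ : PySem.Dict String String) "date" "" ≠ "unknown"))
instance (entries : List (String × (List (String × String)))) : Decidable (Pre_collect_years entries) := by
  unfold Pre_collect_years; infer_instance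

def pvWitness_collect_years : (List (String × (List (String × String)))) :=
  [("Entry_One", [("date", "2020-01-01")]), ("Entry_Two", [("date", "")])]

def Spec_collect_years (entries : List (String × (List (String × String)))) (out : List (String × (List (String × (List (String × String)))))) : Prop := out = collect_years_alt entries
instance (entries : List (String × (List (String × String)))) (out : List (String × (List (String × (List (String × String)))))) : Decidable (Spec_collect_years entries out) := by unfold Spec_collect_years; infer_instance

-- ===== CLAIM (what is proved, stated in full; the proofs are below) =====
def Claim_equal_collect_years : Prop := ∀ (entries : List (String × (List (String × String)))), Dom_collect_years entries → Pre_collect_years entries → Spec_collect_years entries (collect_years entries)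

-- ===== LEMMAS AND PROOFS =====

-- the normalised date of an entry pair, as both A and B compute it
def pvTrip (p : String × (List (String × String))) : String × String × List (String × String) :=
  (if PySem.Dict.getD (⟨p.2⟩ : PySem.Dict String String) "date" "" = "" then "unknown"
   else PySem.Dict.getD (⟨p.2⟩ : PySem.Dict String String) "date" "", p.1, p.2)

-- the year key of a normalised date
def pvKey (d : String) : String :=
  if d = "unknown" then d else PySem.Str.slice d none (some 4)

-- dates Pre_ admits (after normalisation)
def pvGood (d : String) : Prop := d.toList.take 4 = ['u','n','k','n'] → d = "unknown"

theorem pv_cons_le_cons_iff (a b : Char) (l1 l2 : List Char) :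
    (a::l1) ≤ (b::l2) ↔ a < b ∨ (a = b ∧ l1 ≤ l2) := by
  rw [← not_lt, List.cons_lt_cons_iff, ← not_lt (a := l2) (b := l1)]
  rcases lt_trichotomy a b with h | h | h
  · simp [h, h.ne', not_lt_of_gt h]
  · subst h; simp
  · constructor
    · intro hn; exact absurd (Or.inl h) hn
    · rintro (h' | ⟨rfl, _⟩)
      · exact absurd h (not_lt_of_gt h')
      · exact absurd h (lt_irrefl _)

theorem pv_take_mono {l1 l2 : List Char} (n : Nat) (h : l1 ≤ l2) : l1.take n ≤ l2.take n := by
  induction l1 generalizing l2 n with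
  | nil => simp only [List.take_nil]; rw [← not_lt]; exact List.not_lt_nil (l2.take n)
  | cons a t ih =>
    cases l2 with
    | nil => rw [← not_lt] at h; exact absurd (List.nil_lt_cons a t) h
    | cons b u =>
      rcases (pv_cons_le_cons_iff a b t u).mp h with hlt | ⟨rfl, hle⟩
      · cases n with
        | zero => exact le_refl _
        | succ m => exact (pv_cons_le_cons_iff _ _ _ _).mpr (Or.inl hlt)
      · cases n with
        | zero => exact le_refl _
        | succ m => exact (pv_cons_le_cons_iff _ _ _ _).mpr (Or.inr ⟨rfl, ih m hle⟩)

theorem pv_take_le_self (l : List Char) (n : Nat) : l.take n ≤ l := by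
  rw [← not_lt]; exact (List.take_prefix n l).le

theorem pvKey_toList (d : String) :
    (pvKey d).toList = if d = "unknown" then d.toList else d.toList.take 4 := by
  by_cases h : d = "unknown" <;>
    simp [pvKey, h, PySem.Str.slice, PySem.List.slice_to (b := (4:Int)) _ (by norm_num)]

theorem pvKey_mono {d1 d2 : String} (g1 : pvGood d1) (hle : d2 ≤ d1) : pvKey d2 ≤ pvKey d1 := by
  have hl : d2.toList ≤ d1.toList := String.le_iff_toList_le.mp hle
  rw [String.le_iff_toList_le, pvKey_toList, pvKey_toList]
  by_cases h2 : d2 = "unknown" <;> by_cases h1 : d1 = "unknown" <;> simp only [h1, h2, if_pos, if_false]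
  · subst h1 h2; exact le_refl _
  · subst h2
    by_contra hc
    have hlt := le_of_lt (not_le.mp hc)
    have h4 : d1.toList.take 4 ≤ ['u','n','k','n'] := by
      have := pv_take_mono 4 hlt
      rwa [List.take_take, min_self, show "unknown".toList.take 4 = ['u','n','k','n'] by decide] at this
    have h5 : ['u','n','k','n'] ≤ d1.toList.take 4 := by
      have := pv_take_mono 4 hl
      rwa [show "unknown".toList.take 4 = ['u','n','k','n'] by decide] at this
    exact h1 (g1 (le_antisymm h4 h5))
  · subst h1; exact le_trans (pv_take_le_self d2.toList 4) hl
  · exact pv_take_mono 4 hl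

theorem pv_foldl_add_sublist {α : Type} [BEq α] (xs : List α) (s : List α) :
    ∃ t, xs.foldl PySem.Set.add s = s ++ t ∧ t.Sublist xs := by
  induction xs generalizing s with
  | nil => exact ⟨[], by simp⟩
  | cons x xs ih =>
    by_cases hc : s.contains x = true
    · obtain ⟨t, h1, h2⟩ := ih s
      exact ⟨t, by simpa [PySem.Set.add, hc] using h1, h2.cons x⟩
    · obtain ⟨t, h1, h2⟩ := ih (s ++ [x])
      exact ⟨x :: t, by simpa [PySem.Set.add, hc] using h1, h2.cons₂ x⟩

theorem pv_ofList_pairwise_gt {κ : Type} [BEq κ] [LawfulBEq κ] [LinearOrder κ] (xs : List κ)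
    (h : xs.Pairwise (fun a b => b ≤ a)) :
    (PySem.Set.ofList xs).Pairwise (fun a b => b < a) := by
  obtain ⟨t, h1, h2⟩ := pv_foldl_add_sublist xs []
  have hof : PySem.Set.ofList xs = t := by simpa [PySem.Set.ofList_eq_foldl] using h1
  have hle : (PySem.Set.ofList xs).Pairwise (fun a b => b ≤ a) := by
    rw [hof]; exact List.Pairwise.sublist h2 h
  have hnd : (PySem.Set.ofList xs).Nodup := PySem.Set.nodup_ofList xs
  exact (hle.and hnd).imp (fun ⟨hab, hne⟩ => lt_of_le_of_ne hab (Ne.symm hne))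

theorem pv_insertBy_eq_cons_of_all {α : Type} (bef : α → α → Bool) (x : α) (zs : List α)
    (h : ∀ z ∈ zs, bef x z = true) : PySem.List.insertBy bef x zs = x :: zs := by
  cases zs with
  | nil => simp [PySem.List.insertBy]
  | cons z t => simp [PySem.List.insertBy, h z (by simp)]

theorem pv_filter_insertBy {α κ : Type} [LinearOrder κ] (key : α → κ) (p : α → Bool) (x : α)
    (acc : List α) (h : acc.Pairwise (fun a b => key b ≤ key a)) :
    (PySem.List.insertBy (fun a b => decide (key b < key a)) x acc).filter p =
      if p x then PySem.List.insertBy (fun a b => decide (key b < key a)) x (acc.filter p)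
      else acc.filter p := by
  induction acc with
  | nil => cases hp : p x <;> simp [PySem.List.insertBy, hp]
  | cons y t ih =>
    rw [List.pairwise_cons] at h
    obtain ⟨hy, ht⟩ := h
    by_cases hk : key y < key x
    · have hall : ∀ z ∈ (y::t).filter p, decide (key z < key x) = true := by
        intro z hz
        rcases List.mem_cons.mp (List.mem_of_mem_filter hz) with rfl | hzt
        · simpa using hk
        · simpa using lt_of_le_of_lt (hy z hzt) hk
      cases hp : p x
      · simp [PySem.List.insertBy, hk, hp]
      · rw [pv_insertBy_eq_cons_of_all _ x ((y::t).filter p) hall]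
        simp [PySem.List.insertBy, hk, hp]
    · cases hp : p x <;> cases hpy : p y <;>
        simp [PySem.List.insertBy, hk, hp, hpy, ih ht]

theorem pv_filter_sorted_rev {α κ : Type} [LinearOrder κ] (key : α → κ) (p : α → Bool)
    (xs : List α) :
    (PySem.List.sorted xs key true).filter p = PySem.List.sorted (xs.filter p) key true := by
  induction xs using List.reverseRecOn with
  | nil => simp [PySem.List.sorted]
  | append_singleton ys x ih =>
    have e : ∀ zs : List α, PySem.List.sorted (zs ++ [x]) key true =
        PySem.List.insertBy (fun a b => decide (key b < key a)) x
          (PySem.List.sorted zs key true) := by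
      intro zs
      rw [PySem.List.sorted_rev_eq_foldl_insertBy, PySem.List.sorted_rev_eq_foldl_insertBy,
        List.foldl_append]
      simp
    rw [e, pv_filter_insertBy key p x _ (PySem.List.sorted_pairwise_rev ys key),
      List.filter_append]
    cases hp : p x
    · simp [hp, ih]
    · simp only [hp, List.filter_cons, List.filter_nil, if_true]
      rw [e, ih]

theorem pv_A_norm (entries : List (String × (List (String × String)))) :
    collect_years entries =
      (PySem.Set.ofList ((PySem.List.sorted (entries.map pvTrip) (fun t => t.1) true).map
          (fun t => pvKey t.1))).map
        (fun c => (c, ((PySem.List.sorted (entries.map pvTrip) (fun t => t.1) true).filter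
            (fun t => pvKey t.1 == c)).map (fun t => t.2))) := by
  unfold collect_years
  have hmap : (fun p : String × (List (String × String)) =>
      ((if PySem.Dict.getD (⟨p.2⟩ : PySem.Dict String String) "date" "" ≠ "" then
          PySem.Dict.getD (⟨p.2⟩ : PySem.Dict String String) "date" "" else "unknown"),
        p.1, p.2)) = pvTrip := by
    funext p; simp [pvTrip, ite_not]
  rw [hmap]
  have hstep : (fun (y : PySem.Dict String (List (String × List (String × String))))
      (t : String × String × List (String × String)) =>
      let key := if t.1 ≠ "unknown" then PySem.Str.slice t.1 none (some 4) else t.1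
      if y.contains key then y.insert key (y.getD key [] ++ [t.2]) else y.insert key [t.2]) =
      (fun y t => y.modify (pvKey t.1) []
        ((fun (_ : PySem.Dict String (List (String × List (String × String))))
          (t : String × String × List (String × String)) => fun v => v ++ [t.2]) y t)) := by
    funext y t
    have hk : (if t.1 ≠ "unknown" then PySem.Str.slice t.1 none (some 4) else t.1) = pvKey t.1 := by
      simp [pvKey, ite_not]
    show (if y.contains (if t.1 ≠ "unknown" then PySem.Str.slice t.1 none (some 4) else t.1) then _ else _) = _
    rw [hk]
    by_cases hc : y.contains (pvKey t.1) = true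
    · simp [hc, PySem.Dict.modify]
    · simp only [PySem.Dict.modify]
      rw [PySem.Dict.getD_of_not_contains y [] (by simpa using hc)]
      simp [hc]
  rw [hstep]
  dsimp only
  rw [PySem.Dict.items_eq_map_keys _
    (PySem.Dict.nodup_keys_foldl_modify_key _ _ _ _ _ PySem.Dict.nodup_keys_empty) [],
    PySem.Dict.keys_foldl_modify_key]
  have hupd : PySem.Set.update (PySem.Dict.empty
      (κ := String) (ν := List (String × List (String × String)))).keys
      ((PySem.List.sorted (entries.map pvTrip) (fun t => t.1) true).map (fun t => pvKey t.1)) =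
      PySem.Set.ofList ((PySem.List.sorted (entries.map pvTrip) (fun t => t.1) true).map
        (fun t => pvKey t.1)) := by
    rw [PySem.Dict.keys_empty, PySem.Set.ofList_eq_foldl]; rfl
  rw [hupd]
  refine List.map_congr_left (fun c _ => ?_)
  have hY : (List.foldl (fun y t => y.modify (pvKey t.1) [] fun v => v ++ [t.2])
      PySem.Dict.empty (PySem.List.sorted (entries.map pvTrip) (fun t => t.1) true)) =
      List.foldl (fun d q => d.modify q.1 [] fun v => v ++ [q.2]) PySem.Dict.empty
        ((PySem.List.sorted (entries.map pvTrip) (fun t => t.1) true).map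
          (fun t => (pvKey t.1, t.2))) :=
    (List.foldl_map (f := fun t : String × String × List (String × String) => (pvKey t.1, t.2))
      (g := fun (d : PySem.Dict String (List (String × List (String × String)))) q => d.modify q.1 [] fun v => v ++ [q.2])).symm
  rw [hY, PySem.Dict.getD_foldl_modify_append]
  simp [List.filter_map, List.map_map, Function.comp_def]

theorem pv_B_norm (entries : List (String × (List (String × String)))) :
    collect_years_alt entries =
      (PySem.List.sorted (PySem.Set.ofList ((entries.map pvTrip).map (fun t => pvKey t.1)))
          (fun x => x) true).map
        (fun c => (c, (PySem.List.sorted ((entries.map pvTrip).filter (fun t => pvKey t.1 == c))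
            (fun t => t.1) true).map (fun t => t.2))) := by
  unfold collect_years_alt
  have hstep : (fun (b : PySem.Dict String (List (String × String × List (String × String))))
      (p : String × (List (String × String))) =>
      let d := PySem.Dict.getD (⟨p.2⟩ : PySem.Dict String String) "date" ""
      let date := if d = "" then "unknown" else d
      let key := if date = "unknown" then date else PySem.Str.slice date none (some 4)
      b.modify key [] (fun v => v ++ [(date, p.1, p.2)])) =
      (fun b p => b.modify (pvKey (pvTrip p).1) []
        ((fun (_ : PySem.Dict String (List (String × String × List (String × String))))
          (p : String × (List (String × String))) => fun v => v ++ [pvTrip p]) b p)) := by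
    funext b p; rfl
  rw [hstep]
  dsimp only
  have hB : (List.foldl (fun b p => b.modify (pvKey (pvTrip p).1) [] fun v => v ++ [pvTrip p])
      PySem.Dict.empty entries) =
      List.foldl (fun (b : PySem.Dict String (List (String × String × List (String × String))))
        (t : String × String × List (String × String)) => b.modify (pvKey t.1) [] fun v => v ++ [t])
        PySem.Dict.empty (entries.map pvTrip) :=
    (List.foldl_map (f := pvTrip)
      (g := fun (b : PySem.Dict String (List (String × String × List (String × String))))
        (t : String × String × List (String × String)) =>
        b.modify (pvKey t.1) [] fun v => v ++ [t])).symm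
  rw [hB, PySem.Dict.keys_foldl_modify_key]
  have hupd : PySem.Set.update (PySem.Dict.empty
      (κ := String) (ν := List (String × String × List (String × String)))).keys
      ((entries.map pvTrip).map (fun t => pvKey t.1)) =
      PySem.Set.ofList ((entries.map pvTrip).map (fun t => pvKey t.1)) := by
    rw [PySem.Dict.keys_empty, PySem.Set.ofList_eq_foldl]; rfl
  rw [hupd]
  rw [PySem.Dict.items_foldl_insert_fresh _ (fun a => a) _ _
    (fun a _ => PySem.Dict.contains_empty a)
    (by simpa using (PySem.List.sorted_perm _ _ true).symm.nodup (PySem.Set.nodup_ofList _))]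
  have hemp : (PySem.Dict.empty (κ := String)
      (ν := List (String × (List (String × String))))).items = [] := rfl
  rw [hemp, List.nil_append]
  refine List.map_congr_left (fun c _ => ?_)
  have hP : (List.foldl (fun (b : PySem.Dict String (List (String × String × List (String × String))))
      (t : String × String × List (String × String)) => b.modify (pvKey t.1) [] fun v => v ++ [t])
      PySem.Dict.empty (entries.map pvTrip)) =
      List.foldl (fun d q => d.modify q.1 [] fun v => v ++ [q.2]) PySem.Dict.empty
        ((entries.map pvTrip).map (fun t => (pvKey t.1, t))) :=
    (List.foldl_map (f := fun t : String × String × List (String × String) => (pvKey t.1, t))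
      (g := fun (d : PySem.Dict String (List (String × String × List (String × String)))) q =>
        d.modify q.1 [] fun v => v ++ [q.2])).symm
  rw [hP, PySem.Dict.getD_foldl_modify_append]
  simp [List.filter_map, List.map_map, Function.comp_def]

theorem pv_keys_eq (entries : List (String × (List (String × String))))
    (h : Pre_collect_years entries) :
    PySem.List.sorted (PySem.Set.ofList ((entries.map pvTrip).map (fun t => pvKey t.1)))
        (fun x => x) true =
      PySem.Set.ofList ((PySem.List.sorted (entries.map pvTrip) (fun t => t.1) true).map
        (fun t => pvKey t.1)) := by
  have hS := PySem.List.sorted_perm (entries.map pvTrip) (fun t => t.1) true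
  apply PySem.List.sorted_rev_eq_of_perm_of_pairwise_gt
  · rw [List.perm_ext_iff_of_nodup (PySem.Set.nodup_ofList _) (PySem.Set.nodup_ofList _)]
    intro a
    rw [PySem.Set.mem_ofList, PySem.Set.mem_ofList]
    exact (hS.map (fun t => pvKey t.1)).mem_iff
  · apply pv_ofList_pairwise_gt
    refine List.pairwise_map.mpr ?_
    refine (PySem.List.sorted_pairwise_rev (entries.map pvTrip) (fun t => t.1)).imp_of_mem ?_
    intro a b ha hb hba
    refine pvKey_mono ?_ hba
    have ha0 : a ∈ entries.map pvTrip := hS.mem_iff.mp ha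
    obtain ⟨p, hp, rfl⟩ := List.mem_map.mp ha0
    have hgood := (h p hp).2
    intro h4
    by_cases h0 : PySem.Dict.getD (⟨p.2⟩ : PySem.Dict String String) "date" "" = ""
    · simp [pvTrip, h0]
    · simp only [pvTrip, h0, if_false] at h4 ⊢
      by_contra hne
      exact hgood ⟨h4, hne⟩

-- ===== VERDICT (by name: the statement is the Claim_ definition above) =====
theorem collect_years_spec : Claim_equal_collect_years := by
  intro entries _hdom hpre
  unfold Spec_collect_years
  rw [pv_A_norm, pv_B_norm, pv_keys_eq entries hpre]
  simp only [pv_filter_sorted_rev]
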